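-- pv_equiv track=rewrite | github.com/afonsorcarvalho/engenapp | engc_os/tools/schedule_preventive.py | calcular_divisores
-- ===== SOURCE A (Python) =====
-- def calcular_divisores(lista):
--     """
--     Calcula os divisores de cada número na lista que estão contidos na própria lista.
--
--     Args:
--         lista (list): Uma lista de números inteiros.
--
--     Returns:
--         list: Uma lista de listas, onde cada sublista contém os divisores do número correspondente da entrada.
--
--     Exemplo:
--         >>> input_list = [7, 15, 30, 60, 90, 180, 360]
--         >>> calcular_divisores(input_list)
--         [[], [15], [30, 15], [60, 30, 15], [90, 30, 15], [180, 90, 30, 15], [360, 180, 90, 30, 15]]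
--     """
--     out_list = []
--
--     for numero in lista:
--         divisores = []
--         for i in range(1, numero + 1):
--             if numero % i == 0 and i in lista:  # Verifique se o divisor está na lista
--                 divisores.append(i)
--         out_list.append(divisores)
--
--     return out_list
-- ===== SOURCE B (Python) =====
-- def calcular_divisores(lista):
--     presentes = set(lista)
--     out_list = []
--     for numero in lista:
--         encontrados = set()
--         i = 1
--         while i * i <= numero:
--             if numero % i == 0:
--                 if i in presentes:
--                     encontrados.add(i)
--                 q = numero // i
--                 if q in presentes:
--                     encontrados.add(q)
--             i += 1
--         out_list.append(sorted(encontrados))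
--     return out_list
-- ===== Notes on version B (the rewrite author's own statement) =====
-- stated objective: faster
-- what changed: Per element, A scans all of 1..n testing divisibility and an O(len) list membership; B enumerates divisor pairs (i, n//i) only up to sqrt(n) into a set, checks membership against a precomputed set of the list, and sorts the result.
import Mathlib
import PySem

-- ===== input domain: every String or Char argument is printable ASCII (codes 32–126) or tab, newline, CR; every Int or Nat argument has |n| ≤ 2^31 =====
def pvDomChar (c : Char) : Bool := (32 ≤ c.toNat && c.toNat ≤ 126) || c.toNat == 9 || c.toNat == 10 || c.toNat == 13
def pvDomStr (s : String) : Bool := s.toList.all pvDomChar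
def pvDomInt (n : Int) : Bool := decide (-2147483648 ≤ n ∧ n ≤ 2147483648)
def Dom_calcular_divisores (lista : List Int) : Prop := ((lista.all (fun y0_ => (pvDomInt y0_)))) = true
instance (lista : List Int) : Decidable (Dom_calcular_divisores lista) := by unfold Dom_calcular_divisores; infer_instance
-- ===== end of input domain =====

-- B replaces A's full 1..n trial-division scan per element with a divisor-pair
-- enumeration up to √n over a precomputed set of the list's elements (objective: faster).

-- ===== PORT A =====
def calcular_divisores (lista : List Int) : List (List Int) :=
  lista.foldl
    (fun out_list numero =>
      out_list ++
        [(PySem.List.pyRange 1 (numero + 1)).foldl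
          (fun divisores i =>
            if PySem.Int.mod numero i == 0 && lista.contains i then divisores ++ [i]
            else divisores)
          []])
    []

-- ===== PORT B =====
-- the 'while i * i <= numero' loop of Source B; fuel = numero.toNat + 1 bounds the
-- iteration count (starting from i = 1 the loop body runs at most numero times)
def calcAltWhile (presentes : PySem.Set Int) (numero : Int) :
    Nat → Int → PySem.Set Int → PySem.Set Int
  | 0, _, encontrados => encontrados
  | fuel + 1, i, encontrados =>
    if i * i ≤ numero then
      let enc :=
        if PySem.Int.mod numero i == 0 then
          let enc1 :=
            if PySem.Set.contains presentes i then PySem.Set.add encontrados i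
            else encontrados
          let q := PySem.Int.floordiv numero i
          if PySem.Set.contains presentes q then PySem.Set.add enc1 q else enc1
        else encontrados
      calcAltWhile presentes numero fuel (i + 1) enc
    else encontrados

def calcular_divisores_alt (lista : List Int) : List (List Int) :=
  let presentes := PySem.Set.ofList lista
  lista.foldl
    (fun out_list numero =>
      out_list ++
        [PySem.List.sorted
          (calcAltWhile presentes numero (numero.toNat + 1) 1 PySem.Set.empty)
          (fun x => x)])
    []

-- ===== PRECONDITION & SPEC =====
def Spec_calcular_divisores (lista : List Int) (out : List (List Int)) : Prop := out = calcular_divisores_alt lista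
instance (lista : List Int) (out : List (List Int)) : Decidable (Spec_calcular_divisores lista out) := by unfold Spec_calcular_divisores; infer_instance

-- ===== CLAIM (what is proved, stated in full; the proofs are below) =====
def Claim_equal_calcular_divisores : Prop := ∀ (lista : List Int), Dom_calcular_divisores lista → Spec_calcular_divisores lista (calcular_divisores lista)

-- ===== LEMMAS AND PROOFS =====

-- membership in the while-loop's accumulated set, for sufficient fuel
theorem mem_calcAltWhile (pres : PySem.Set Int) (n : Int) (x : Int) :
    ∀ (fuel : Nat) (i : Int) (enc : PySem.Set Int), 1 ≤ i → n < (i + fuel) * (i + fuel) →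
      (x ∈ calcAltWhile pres n fuel i enc ↔
        x ∈ enc ∨ ∃ j : Int, i ≤ j ∧ j * j ≤ n ∧ PySem.Int.mod n j = 0 ∧
          ((x = j ∨ x = PySem.Int.floordiv n j) ∧ x ∈ pres)) := by
  intro fuel
  induction fuel with
  | zero =>
    intro i enc hi hlt
    simp only [calcAltWhile, Nat.cast_zero, add_zero] at hlt ⊢
    constructor
    · exact Or.inl
    · rintro (h | ⟨j, hij, hjj, _⟩)
      · exact h
      · exfalso; nlinarith
  | succ fuel ih =>
    intro i enc hi hlt
    simp only [calcAltWhile]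
    by_cases hc : i * i ≤ n
    · simp only [if_pos hc]
      rw [ih (i + 1) _ (by omega) (by push_cast at hlt ⊢; nlinarith)]
      have hstep : ∀ y : Int,
          (y ∈ (if PySem.Int.mod n i == 0 then
              (let enc1 := if PySem.Set.contains pres i then PySem.Set.add enc i else enc
               if PySem.Set.contains pres (PySem.Int.floordiv n i) then
                 PySem.Set.add enc1 (PySem.Int.floordiv n i) else enc1)
            else enc)) ↔
          (y ∈ enc ∨ (PySem.Int.mod n i = 0 ∧
            ((y = i ∨ y = PySem.Int.floordiv n i) ∧ y ∈ pres))) := by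
        intro y
        by_cases hm : PySem.Int.mod n i = 0
        · simp only [hm, beq_self_eq_true, if_true]
          by_cases h1 : i ∈ pres <;> by_cases h2 : PySem.Int.floordiv n i ∈ pres <;>
            simp only [PySem.Set.contains_iff, PySem.Set.mem_add, h1, h2,
              decide_true, decide_false, if_true, if_false] <;> aesop
        · simp only [beq_iff_eq, if_neg hm]; tauto
      constructor
      · rintro (h | ⟨j, hij, hjj, hm, hx⟩)
        · rw [hstep] at h
          rcases h with h | ⟨hm, hx⟩
          · exact Or.inl h
          · exact Or.inr ⟨i, le_refl i, hc, hm, hx⟩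
        · exact Or.inr ⟨j, by omega, hjj, hm, hx⟩
      · rintro (h | ⟨j, hij, hjj, hm, hx⟩)
        · exact Or.inl ((hstep x).mpr (Or.inl h))
        · by_cases hji : j = i
          · subst hji; exact Or.inl ((hstep x).mpr (Or.inr ⟨hm, hx⟩))
          · exact Or.inr ⟨j, by omega, hjj, hm, hx⟩
    · simp only [if_neg hc]
      constructor
      · exact Or.inl
      · rintro (h | ⟨j, hij, hjj, _⟩)
        · exact h
        · exfalso
          have : i * i ≤ j * j := by nlinarith
          omega

-- the √n divisor-pair enumeration hits exactly the divisors of n in [1, n]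
theorem pair_enum_iff (n x : Int) :
    (∃ j : Int, 1 ≤ j ∧ j * j ≤ n ∧ PySem.Int.mod n j = 0 ∧
        (x = j ∨ x = PySem.Int.floordiv n j)) ↔
      (1 ≤ x ∧ x ≤ n ∧ PySem.Int.mod n x = 0) := by
  constructor
  · rintro ⟨j, hj1, hjj, hm, hx⟩
    have hjd : j ∣ n := (PySem.Int.mod_eq_zero_iff_dvd n j).mp hm
    have hjn : j ≤ n := by nlinarith
    have hq : PySem.Int.floordiv n j = n / j := PySem.Int.floordiv_eq_ediv_of_pos (by omega)
    obtain ⟨c, hcn⟩ := hjd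
    have hc1 : 1 ≤ c := by nlinarith
    have hcval : n / j = c := by rw [hcn]; exact Int.mul_ediv_cancel_left c (by omega)
    rcases hx with rfl | rfl
    · exact ⟨hj1, hjn, hm⟩
    · refine ⟨by rw [hq, hcval]; omega, by rw [hq, hcval]; nlinarith, ?_⟩
      rw [hq, hcval, PySem.Int.mod_eq_zero_iff_dvd]
      exact ⟨j, by rw [hcn]; ring⟩
  · rintro ⟨hx1, hxn, hm⟩
    have hxd : x ∣ n := (PySem.Int.mod_eq_zero_iff_dvd n x).mp hm
    obtain ⟨c, hcn⟩ := hxd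
    have hc1 : 1 ≤ c := by nlinarith
    by_cases hs : x * x ≤ n
    · exact ⟨x, hx1, hs, hm, Or.inl rfl⟩
    · refine ⟨c, hc1, by nlinarith, ?_, Or.inr ?_⟩
      · rw [PySem.Int.mod_eq_zero_iff_dvd]; exact ⟨x, by rw [hcn]; ring⟩
      · rw [PySem.Int.floordiv_eq_ediv_of_pos (by omega), hcn, mul_comm]
        exact (Int.mul_ediv_cancel_left x (by omega)).symm

-- the while loop preserves Nodup of the accumulator
theorem nodup_calcAltWhile (pres : PySem.Set Int) (n : Int) :
    ∀ (fuel : Nat) (i : Int) (enc : PySem.Set Int), enc.Nodup →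
      (calcAltWhile pres n fuel i enc).Nodup := by
  intro fuel
  induction fuel with
  | zero => intro i enc h; simpa [calcAltWhile] using h
  | succ fuel ih =>
    intro i enc h
    simp only [calcAltWhile]
    split
    · apply ih
      split
      · split <;> split <;>
          first
            | exact PySem.Set.nodup_add _ _ (PySem.Set.nodup_add _ _ h)
            | exact PySem.Set.nodup_add _ _ h
            | exact h
      · exact h
    · exact h

-- per-element agreement: B's sorted pair-enumeration set equals A's inner scan
theorem inner_eq (lista : List Int) (n : Int) :
    PySem.List.sorted
        (calcAltWhile (PySem.Set.ofList lista) n (n.toNat + 1) 1 PySem.Set.empty)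
        (fun x => x) =
      (PySem.List.pyRange 1 (n + 1)).filter
        (fun i => PySem.Int.mod n i == 0 && lista.contains i) := by
  have hpw : ((PySem.List.pyRange 1 (n + 1)).filter
      (fun i => PySem.Int.mod n i == 0 && lista.contains i)).Pairwise (· < ·) :=
    (PySem.List.pairwise_lt_pyRange_one 1 (n + 1)).filter _
  apply PySem.List.sorted_eq_of_perm_of_pairwise_lt
  · apply (List.perm_ext_iff_of_nodup (List.Nodup.filter _
      (List.Pairwise.imp ne_of_lt (PySem.List.pairwise_lt_pyRange_one 1 (n + 1))))
      (nodup_calcAltWhile _ _ _ _ _ List.nodup_nil)).mpr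
    intro x
    rw [List.mem_filter, PySem.List.mem_pyRange_one,
      mem_calcAltWhile _ _ _ _ _ _ (by omega)
        (by push_cast; nlinarith [Int.self_le_toNat n])]
    simp only [List.not_mem_nil, false_or, PySem.Set.mem_ofList,
      Bool.and_eq_true, beq_iff_eq, List.contains_eq_mem, decide_eq_true_eq]
    constructor
    · rintro ⟨⟨h1, h2⟩, h3, h4⟩
      obtain ⟨j, hj1, hj2, hj3, hj4⟩ := (pair_enum_iff n x).mpr ⟨h1, by omega, h3⟩
      exact ⟨j, hj1, hj2, hj3, hj4, h4⟩
    · rintro ⟨j, h1, h2, h3, h4, h5⟩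
      have hx := (pair_enum_iff n x).mp ⟨j, h1, h2, h3, h4⟩
      exact ⟨⟨hx.1, by omega⟩, hx.2.2, h5⟩
  · exact hpw

-- ===== VERDICT (by name: the statement is the Claim_ definition above) =====
theorem calcular_divisores_spec : Claim_equal_calcular_divisores := by
  intro lista _
  unfold Spec_calcular_divisores calcular_divisores calcular_divisores_alt
  simp only [PySem.List.foldl_append_singleton_eq_map, List.nil_append]
  apply List.map_congr_left
  intro n _
  rw [PySem.List.foldl_append_if_eq_filter
    (fun i => PySem.Int.mod n i == 0 && lista.contains i), List.nil_append]
  exact (inner_eq lista n).symm
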